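-- pv_equiv track=rewrite | github.com/ZHANGV25/poker-engine-2026 | submission/inference.py | _draw_bonus
-- ===== SOURCE A (Python) =====
-- def _draw_bonus(kept, board):
--     """Estimate drawing potential from card patterns.
--
--     The 5-card rank evaluates made hand strength only. Drawing hands
--     (flush draws, straight draws) have high equity but rank as high-card.
--     This bonus makes draws rank closer to their true equity value.
--
--     27-card deck: 3 suits × 9 ranks (2-9, A).
--     Card encoding: suit = c // 9, rank = c % 9.
--
--     Returns a positive value (higher = stronger draw).
--     """
--     all_cards = kept + board  # 5 cards
--     bonus = 0
--
--     # --- Flush draw detection ---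
--     # 4 of same suit in 5 cards = 1 card short of flush.
--     # With 9 cards per suit and 2 cards to come, ~51% to complete.
--     suit_counts = [0, 0, 0]
--     kept_suit_counts = [0, 0, 0]
--     for c in all_cards:
--         suit_counts[c // 9] += 1
--     for c in kept:
--         kept_suit_counts[c // 9] += 1
--
--     for s in range(3):
--         if suit_counts[s] >= 4 and kept_suit_counts[s] >= 1:
--             # 4-to-flush with at least one kept card contributing
--             bonus += 3000
--             break
--
--     # --- Straight draw detection ---
--     # Ranks: 0=2, 1=3, 2=4, 3=5, 4=6, 5=7, 6=8, 7=9, 8=A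
--     rank_set = set(c % 9 for c in all_cards)
--     ranks_sorted = sorted(rank_set)
--
--     # Find longest run of consecutive ranks
--     max_run = 1
--     run = 1
--     for i in range(1, len(ranks_sorted)):
--         if ranks_sorted[i] == ranks_sorted[i - 1] + 1:
--             run += 1
--             if run > max_run:
--                 max_run = run
--         else:
--             run = 1
--
--     # Ace-low wrap: treat A(8) as rank -1 for A-2-3-4-5 straights
--     if 8 in rank_set:
--         ace_low = sorted([-1] + [r for r in ranks_sorted if r != 8])
--         run = 1
--         for i in range(1, len(ace_low)):
--             if ace_low[i] == ace_low[i - 1] + 1: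
--                 run += 1
--                 if run > max_run:
--                     max_run = run
--             else:
--                 run = 1
--
--     if max_run >= 4:
--         bonus += 1500  # OESD (~35% to complete)
--     elif max_run == 3:
--         bonus += 400  # Some connectivity
--
--     return bonus
-- ===== SOURCE B (Python) =====
-- def _draw_bonus(kept, board):
--     """Same draw bonus, but the straight draw is read off a fixed 10-slot
--     presence table (low-ace slot + ranks 0..8) in one scan, with no sorting."""
--     all_cards = kept + board
--     bonus = 0
--
--     suit_counts = [0, 0, 0]
--     kept_suit_counts = [0, 0, 0]
--     for c in all_cards:
--         suit_counts[c // 9] += 1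
--     for c in kept:
--         kept_suit_counts[c // 9] += 1
--     for s in range(3):
--         if suit_counts[s] >= 4 and kept_suit_counts[s] >= 1:
--             bonus += 3000
--             break
--
--     ranks = set(c % 9 for c in all_cards)
--     # slot 0 = ace played low, slot r+1 = rank r; a run can never bridge
--     # the low ace and the high ace (that would need all 10 slots).
--     present = [8 in ranks] + [r in ranks for r in range(9)]
--     max_run = 0
--     run = 0
--     for ok in present:
--         run = run + 1 if ok else 0
--         if run > max_run:
--             max_run = run
--
--     if max_run >= 4:
--         bonus += 1500
--     elif max_run == 3:
--         bonus += 400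
--     return bonus
-- ===== Notes on version B (the rewrite author's own statement) =====
-- stated objective: simpler
-- what changed: The straight-draw half no longer sorts the rank set and runs two scans (normal and ace-low): B builds a fixed 10-slot presence table (low-ace slot followed by ranks 0-8) and finds the longest run of consecutive present slots in one scan; the flush-draw block is unchanged.
import Mathlib
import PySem

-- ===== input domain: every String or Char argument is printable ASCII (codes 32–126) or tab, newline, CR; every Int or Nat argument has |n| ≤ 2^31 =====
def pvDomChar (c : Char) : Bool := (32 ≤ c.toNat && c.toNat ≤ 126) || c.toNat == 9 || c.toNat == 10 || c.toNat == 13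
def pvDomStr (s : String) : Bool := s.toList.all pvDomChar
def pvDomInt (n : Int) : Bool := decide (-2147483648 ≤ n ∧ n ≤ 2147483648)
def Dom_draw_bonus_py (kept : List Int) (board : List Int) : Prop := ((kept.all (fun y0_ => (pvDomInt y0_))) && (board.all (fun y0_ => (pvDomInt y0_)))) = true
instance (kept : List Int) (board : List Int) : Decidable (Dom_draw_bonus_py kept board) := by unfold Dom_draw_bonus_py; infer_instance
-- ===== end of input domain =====

-- B replaces A's sort-then-two-scans straight-draw detection by a single scan of a
-- fixed 10-slot rank-presence table (low-ace slot + ranks 0..8); flush block unchanged.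

-- ===== PORT A =====
-- suit_counts loop: for c in cards: counts[c // 9] += 1
def pvCountsA (cards : List Int) : List Int :=
  cards.foldl (fun sc c =>
    PySem.List.pySetD sc (PySem.Int.floordiv c 9)
      (PySem.List.pyGetD sc (PySem.Int.floordiv c 9) 0 + 1)) [0, 0, 0]

-- for s in range(3): if suit_counts[s] >= 4 and kept_suit_counts[s] >= 1: bonus += 3000; break
def pvFlushLoopA (sc kc : List Int) : List Int → Int
  | [] => 0
  | s :: rest =>
    if 4 ≤ PySem.List.pyGetD sc s 0 ∧ 1 ≤ PySem.List.pyGetD kc s 0 then 3000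
    else pvFlushLoopA sc kc rest

-- the run scan: for i in range(1, len(l)): … ; state = (max_run, run), run reset to 1
def pvScanA (l : List Int) (mr : Int) : Int :=
  ((PySem.List.pyRange 1 (PySem.List.len l) 1).foldl
    (fun (p : Int × Int) i =>
      if PySem.List.pyGetD l i 0 = PySem.List.pyGetD l (i - 1) 0 + 1 then
        ((if p.2 + 1 > p.1 then p.2 + 1 else p.1), p.2 + 1)
      else (p.1, 1)) (mr, 1)).1

-- the straight-draw block of A, as a function of rank_set
def pvStraightA (rank_set : PySem.Set Int) : Int :=
  let ranks_sorted := PySem.List.sorted rank_set (fun x => x) false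
  let mr1 := pvScanA ranks_sorted 1
  let mr :=
    if PySem.Set.contains rank_set 8 then
      pvScanA
        (PySem.List.sorted ([-1] ++ ranks_sorted.filter (fun r => !(r == 8)))
          (fun x => x) false) mr1
    else mr1
  if mr ≥ 4 then 1500 else if mr = 3 then 400 else 0

def draw_bonus_py (kept : List Int) (board : List Int) : Int :=
  let all_cards := kept ++ board
  let suit_counts := pvCountsA all_cards
  let kept_suit_counts := pvCountsA kept
  let bonus : Int := 0 + pvFlushLoopA suit_counts kept_suit_counts (PySem.List.pyRange 0 3 1)
  let rank_set : PySem.Set Int := PySem.Set.ofList (all_cards.map (fun c => PySem.Int.mod c 9))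
  bonus + pvStraightA rank_set

-- ===== PORT B =====
def pvCountsB (cards : List Int) : List Int :=
  cards.foldl (fun sc c =>
    PySem.List.pySetD sc (PySem.Int.floordiv c 9)
      (PySem.List.pyGetD sc (PySem.Int.floordiv c 9) 0 + 1)) [0, 0, 0]

def pvFlushLoopB (sc kc : List Int) : List Int → Int
  | [] => 0
  | s :: rest =>
    if 4 ≤ PySem.List.pyGetD sc s 0 ∧ 1 ≤ PySem.List.pyGetD kc s 0 then 3000
    else pvFlushLoopB sc kc rest

-- B's straight-draw block: one scan over the 10-slot presence table
def pvStraightB (ranks : PySem.Set Int) : Int :=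
  let present :=
    PySem.Set.contains ranks 8 ::
      (PySem.List.pyRange 0 9 1).map (fun r => PySem.Set.contains ranks r)
  let mr :=
    (present.foldl
      (fun (p : Int × Int) ok =>
        let run : Int := if ok then p.2 + 1 else 0
        ((if run > p.1 then run else p.1), run)) (0, 0)).1
  if mr ≥ 4 then 1500 else if mr = 3 then 400 else 0

def draw_bonus_py_alt (kept : List Int) (board : List Int) : Int :=
  let all_cards := kept ++ board
  let suit_counts := pvCountsB all_cards
  let kept_suit_counts := pvCountsB kept
  let bonus : Int := 0 + pvFlushLoopB suit_counts kept_suit_counts (PySem.List.pyRange 0 3 1)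
  let ranks : PySem.Set Int := PySem.Set.ofList (all_cards.map (fun c => PySem.Int.mod c 9))
  bonus + pvStraightB ranks

-- ===== PRECONDITION & SPEC =====
-- A raises IndexError on suit_counts[c // 9] when c // 9 is outside [-3, 2], i.e. when
-- some card is outside [-27, 26]; Pre_ excludes exactly those inputs.
def Pre_draw_bonus_py (kept : List Int) (board : List Int) : Prop :=
  ∀ c ∈ kept ++ board, -27 ≤ c ∧ c < 27
instance (kept : List Int) (board : List Int) : Decidable (Pre_draw_bonus_py kept board) := by
  unfold Pre_draw_bonus_py; infer_instance

def pvWitness_draw_bonus_py : List Int × List Int := ([0, 9], [1, 2, 18])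

def Spec_draw_bonus_py (kept : List Int) (board : List Int) (out : Int) : Prop :=
  out = draw_bonus_py_alt kept board
instance (kept : List Int) (board : List Int) (out : Int) : Decidable (Spec_draw_bonus_py kept board out) := by
  unfold Spec_draw_bonus_py; infer_instance

-- ===== CLAIM (what is proved, stated in full; the proofs are below) =====
def Claim_equal_draw_bonus_py : Prop := ∀ (kept : List Int) (board : List Int), Dom_draw_bonus_py kept board → Pre_draw_bonus_py kept board → Spec_draw_bonus_py kept board (draw_bonus_py kept board)

-- ===== LEMMAS AND PROOFS =====

-- the strictly increasing list of ranks present, as a function of nine presence bits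
def pvL9 (b0 b1 b2 b3 b4 b5 b6 b7 b8 : Bool) : List Int :=
  (if b0 then [0] else []) ++ (if b1 then [1] else []) ++ (if b2 then [2] else []) ++
  (if b3 then [3] else []) ++ (if b4 then [4] else []) ++ (if b5 then [5] else []) ++
  (if b6 then [6] else []) ++ (if b7 then [7] else []) ++ (if b8 then [8] else [])

lemma pv_contains_perm (S S' : List Int) (h : S.Perm S') (x : Int) :
    PySem.Set.contains S x = PySem.Set.contains S' x := by
  rw [Bool.eq_iff_iff]
  simp [h.mem_iff]

lemma pv_straightA_perm (S S' : List Int) (h : S.Perm S') :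
    pvStraightA S = pvStraightA S' := by
  unfold pvStraightA
  rw [PySem.List.sorted_eq_sorted_of_perm S S' (fun x => x) (fun a b hab => hab) h,
      pv_contains_perm S S' h 8]

lemma pv_straightB_perm (S S' : List Int) (h : S.Perm S') :
    pvStraightB S = pvStraightB S' := by
  unfold pvStraightB
  simp only [pv_contains_perm S S' h]

lemma pv_master : ∀ b0 b1 b2 b3 b4 b5 b6 b7 b8 : Bool,
    pvStraightA (pvL9 b0 b1 b2 b3 b4 b5 b6 b7 b8) =
      pvStraightB (pvL9 b0 b1 b2 b3 b4 b5 b6 b7 b8) := by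
  decide

lemma pv_perm_pvL9 (S : List Int) (hnd : S.Nodup) (hb : ∀ x ∈ S, 0 ≤ x ∧ x < 9) :
    S.Perm (pvL9 (decide ((0:Int) ∈ S)) (decide ((1:Int) ∈ S)) (decide ((2:Int) ∈ S))
      (decide ((3:Int) ∈ S)) (decide ((4:Int) ∈ S)) (decide ((5:Int) ∈ S))
      (decide ((6:Int) ∈ S)) (decide ((7:Int) ∈ S)) (decide ((8:Int) ∈ S))) := by
  have hnd' : (pvL9 (decide ((0:Int) ∈ S)) (decide ((1:Int) ∈ S)) (decide ((2:Int) ∈ S))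
      (decide ((3:Int) ∈ S)) (decide ((4:Int) ∈ S)) (decide ((5:Int) ∈ S))
      (decide ((6:Int) ∈ S)) (decide ((7:Int) ∈ S)) (decide ((8:Int) ∈ S))).Nodup := by
    have h : ∀ b0 b1 b2 b3 b4 b5 b6 b7 b8 : Bool,
        (pvL9 b0 b1 b2 b3 b4 b5 b6 b7 b8).Nodup := by decide
    exact h _ _ _ _ _ _ _ _ _
  refine List.perm_of_nodup_nodup_toFinset_eq hnd hnd' ?_
  ext x
  simp only [List.mem_toFinset, pvL9, List.mem_append, List.mem_ite_nil_right,
    List.mem_singleton, decide_eq_true_eq]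
  constructor
  · intro hx
    obtain ⟨h0, h9⟩ := hb x hx
    interval_cases x <;> simp [hx]
  · rintro ((((((((⟨h, rfl⟩ | ⟨h, rfl⟩) | ⟨h, rfl⟩) | ⟨h, rfl⟩) | ⟨h, rfl⟩) | ⟨h, rfl⟩) | ⟨h, rfl⟩) | ⟨h, rfl⟩) | ⟨h, rfl⟩) <;> exact h

lemma pv_flushLoop_eq (sc kc : List Int) (l : List Int) :
    pvFlushLoopA sc kc l = pvFlushLoopB sc kc l := by
  induction l with
  | nil => rfl
  | cons s rest ih => simp [pvFlushLoopA, pvFlushLoopB, ih]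

lemma pv_straight_eq (rlist : List Int) (hb : ∀ x ∈ rlist, 0 ≤ x ∧ x < 9) :
    pvStraightA (PySem.Set.ofList rlist) = pvStraightB (PySem.Set.ofList rlist) := by
  have hnd : (PySem.Set.ofList rlist).Nodup := PySem.Set.nodup_ofList rlist
  have hb' : ∀ x ∈ PySem.Set.ofList rlist, 0 ≤ x ∧ x < 9 := by
    intro x hx
    exact hb x (by simpa [PySem.Set.mem_ofList] using hx)
  have hp := pv_perm_pvL9 (PySem.Set.ofList rlist) hnd hb'
  rw [pv_straightA_perm _ _ hp, pv_straightB_perm _ _ hp, pv_master]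

-- ===== VERDICT (by name: the statement is the Claim_ definition above) =====
theorem draw_bonus_py_spec : Claim_equal_draw_bonus_py := by
  intro kept board _ _
  unfold Spec_draw_bonus_py draw_bonus_py draw_bonus_py_alt
  have hc : pvCountsA = pvCountsB := rfl
  have hall : ∀ x ∈ (kept ++ board).map (fun c => PySem.Int.mod c 9), 0 ≤ x ∧ x < 9 := by
    intro x hx
    simp only [List.mem_map] at hx
    obtain ⟨c, _, rfl⟩ := hx
    exact ⟨PySem.Int.mod_nonneg c (by norm_num), PySem.Int.mod_lt c (by norm_num)⟩
  simp only [hc, pv_flushLoop_eq, pv_straight_eq _ hall]
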